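-- pv_equiv track=rewrite | github.com/AnthonyGunn/MySorts | shell_sort.py | calc_sort3
-- ===== SOURCE A (Python) =====
-- def calc_sort3(list_length):
--     result = [0]
--     for i in range(0, list_length):
--         for j in range(0, list_length):
--             gap = (2 ** i) * (3 ** j)
--             if gap < list_length:
--                 result.append(gap)
--             else:
--                 break
--     result.reverse()
--     return result
-- ===== SOURCE B (Python) =====
-- def calc_sort3(list_length):
--     # Enumerate 3-smooth numbers 2^i*3^j < list_length by doubling/tripling,
--     # stopping each loop as soon as the value reaches list_length.
--     result = []
--     p2 = 1
--     while p2 < list_length: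
--         g = p2
--         while g < list_length:
--             result.append(g)
--             g *= 3
--         p2 *= 2
--     result.reverse()
--     result.append(0)
--     return result
-- ===== Notes on version B (the rewrite author's own statement) =====
-- stated objective: faster
-- what changed: Replaces the n x n nested range loops (which recompute 2**i*3**j from scratch and keep iterating i long after 2**i >= n) with two while loops that double p2 and triple g, bounded by log2(n) and log3(n); the final list is built as reversed gaps plus a trailing 0.
import Mathlib
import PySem

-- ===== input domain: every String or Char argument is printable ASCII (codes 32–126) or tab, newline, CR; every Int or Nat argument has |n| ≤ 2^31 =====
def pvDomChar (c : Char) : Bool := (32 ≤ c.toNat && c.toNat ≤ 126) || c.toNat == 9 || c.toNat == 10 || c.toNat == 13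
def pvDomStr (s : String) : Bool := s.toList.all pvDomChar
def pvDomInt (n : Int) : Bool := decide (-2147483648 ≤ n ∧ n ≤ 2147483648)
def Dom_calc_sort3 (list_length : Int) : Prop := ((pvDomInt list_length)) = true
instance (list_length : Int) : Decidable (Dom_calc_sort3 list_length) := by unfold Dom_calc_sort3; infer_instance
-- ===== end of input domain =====

-- B replaces the n×n nested range loops by doubling/tripling while-loops bounded by
-- log2(n)·log3(n); equivalence of return values is proved for ALL Int inputs (no Pre_).

-- ===== PORT A =====
-- inner 'for j in range(0, n)' with break: i,j come from range so they are ≥ 0 and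
-- '2 ** i * 3 ** j' is exactly 2 ^ i.toNat * 3 ^ j.toNat
def pvInnerA (n i : Int) : List Int → List Int → List Int
  | [], res => res
  | j :: js, res =>
      let gap : Int := 2 ^ i.toNat * 3 ^ j.toNat
      if gap < n then pvInnerA n i js (res ++ [gap]) else res

-- outer 'for i in range(0, n)'
def pvOuterA (n : Int) : List Int → List Int → List Int
  | [], res => res
  | i :: is, res => pvOuterA n is (pvInnerA n i (PySem.List.pyRange 0 n 1) res)

def calc_sort3 (list_length : Int) : List Int :=
  (pvOuterA list_length (PySem.List.pyRange 0 list_length 1) [0]).reverse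

-- ===== PORT B =====
-- inner 'while g < n: append; g *= 3'; the '1 ≤ g' conjunct is the termination guard
-- (g starts at p2 ≥ 1 and only triples, so it always holds on reachable calls)
def pvPows3 (n g : Int) : List Int :=
  if h : 1 ≤ g ∧ g < n then g :: pvPows3 n (3 * g) else []
termination_by (n - g).toNat
decreasing_by omega

-- outer 'while p2 < n'; '1 ≤ p' is likewise the termination guard
def pvOuterB (n p : Int) : List Int :=
  if _h : 1 ≤ p ∧ p < n then pvPows3 n p ++ pvOuterB n (2 * p) else []
termination_by (n - p).toNat
decreasing_by omega

def calc_sort3_alt (list_length : Int) : List Int :=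
  (pvOuterB list_length 1).reverse ++ [0]

-- ===== PRECONDITION & SPEC =====
def Spec_calc_sort3 (list_length : Int) (out : List Int) : Prop := out = calc_sort3_alt list_length
instance (list_length : Int) (out : List Int) : Decidable (Spec_calc_sort3 list_length out) := by unfold Spec_calc_sort3; infer_instance

-- ===== CLAIM (what is proved, stated in full; the proofs are below) =====
def Claim_equal_calc_sort3 : Prop := ∀ (list_length : Int), Dom_calc_sort3 list_length → Spec_calc_sort3 list_length (calc_sort3 list_length)

-- ===== LEMMAS AND PROOFS =====

lemma pv_le_two_pow (k : Nat) : (k : Int) + 1 ≤ 2 ^ k := by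
  induction k with
  | zero => norm_num
  | succ k ih => push_cast; rw [pow_succ]; push_cast at ih; nlinarith

lemma pv_le_three_pow (k : Nat) : (k : Int) + 1 ≤ 3 ^ k := by
  induction k with
  | zero => norm_num
  | succ k ih => push_cast; rw [pow_succ]; push_cast at ih; nlinarith

lemma pv_one_le_two_pow (k : Nat) : (1 : Int) ≤ 2 ^ k := one_le_pow₀ (by norm_num)

lemma pv_one_le_three_pow (k : Nat) : (1 : Int) ≤ 3 ^ k := one_le_pow₀ (by norm_num)

lemma pvPows3_nil {n g : Int} (h : ¬ (1 ≤ g ∧ g < n)) : pvPows3 n g = [] := by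
  rw [pvPows3]; simp [h]

lemma pvOuterB_nil {n p : Int} (h : ¬ (1 ≤ p ∧ p < n)) : pvOuterB n p = [] := by
  rw [pvOuterB]; simp [h]

-- the inner loop of A, started at j0 ≥ 0, produces exactly B's triple-chain from 2^i * 3^j0
lemma pv_inner_eq (n i : Int) : ∀ (k : Nat) (j0 : Int), 0 ≤ j0 → (n - j0).toNat ≤ k →
    ∀ res, pvInnerA n i (PySem.List.pyRange j0 n 1) res
      = res ++ pvPows3 n (2 ^ i.toNat * 3 ^ j0.toNat) := by
  intro k
  induction k with
  | zero =>
    intro j0 hj0 hk res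
    have hnj : n ≤ j0 := by omega
    rw [PySem.List.pyRange_one_eq_nil hnj, pvInnerA]
    have hge : (n : Int) ≤ 2 ^ i.toNat * 3 ^ j0.toNat := by
      have h3 : (j0.toNat : Int) + 1 ≤ 3 ^ j0.toNat := pv_le_three_pow _
      have h2 : (1 : Int) ≤ 2 ^ i.toNat := pv_one_le_two_pow _
      have h3p : (1 : Int) ≤ 3 ^ j0.toNat := pv_one_le_three_pow _
      nlinarith [Int.toNat_of_nonneg hj0]
    rw [pvPows3_nil (by omega), List.append_nil]
  | succ k ih =>
    intro j0 hj0 hk res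
    by_cases hlt : j0 < n
    · rw [PySem.List.pyRange_one_cons hlt, pvInnerA]
      by_cases hgap : (2 : Int) ^ i.toNat * 3 ^ j0.toNat < n
      · rw [if_pos hgap, ih (j0 + 1) (by omega) (by omega)]
        have hg1 : (1 : Int) ≤ 2 ^ i.toNat * 3 ^ j0.toNat := by
          have h2 : (1 : Int) ≤ 2 ^ i.toNat := pv_one_le_two_pow _
          have h3 : (1 : Int) ≤ 3 ^ j0.toNat := pv_one_le_three_pow _
          nlinarith
        have hsucc : (j0 + 1).toNat = j0.toNat + 1 := by omega
        conv_rhs => rw [pvPows3]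
        rw [dif_pos ⟨hg1, hgap⟩]
        have harg : (3 : Int) * (2 ^ i.toNat * 3 ^ j0.toNat) = 2 ^ i.toNat * 3 ^ (j0 + 1).toNat := by
          rw [hsucc, pow_succ]; ring
        rw [harg]
        simp
      · rw [if_neg hgap, pvPows3_nil (by tauto), List.append_nil]
    · have hnj : n ≤ j0 := by omega
      rw [PySem.List.pyRange_one_eq_nil hnj, pvInnerA]
      have hge : (n : Int) ≤ 2 ^ i.toNat * 3 ^ j0.toNat := by
        have h3 : (j0.toNat : Int) + 1 ≤ 3 ^ j0.toNat := pv_le_three_pow _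
        have h2 : (1 : Int) ≤ 2 ^ i.toNat := pv_one_le_two_pow _
        have h3p : (1 : Int) ≤ 3 ^ j0.toNat := pv_one_le_three_pow _
        nlinarith [Int.toNat_of_nonneg hj0]
      rw [pvPows3_nil (by omega), List.append_nil]

-- the outer loop of A, started at i0 ≥ 0, produces exactly B's doubling chain from 2^i0
lemma pv_outer_eq (n : Int) : ∀ (k : Nat) (i0 : Int), 0 ≤ i0 → (n - i0).toNat ≤ k →
    ∀ res, pvOuterA n (PySem.List.pyRange i0 n 1) res
      = res ++ pvOuterB n (2 ^ i0.toNat) := by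
  intro k
  induction k with
  | zero =>
    intro i0 hi0 hk res
    have hni : n ≤ i0 := by omega
    rw [PySem.List.pyRange_one_eq_nil hni, pvOuterA]
    have hge : (n : Int) ≤ 2 ^ i0.toNat := by
      have h2 : (i0.toNat : Int) + 1 ≤ 2 ^ i0.toNat := pv_le_two_pow _
      nlinarith [Int.toNat_of_nonneg hi0]
    rw [pvOuterB_nil (by omega), List.append_nil]
  | succ k ih =>
    intro i0 hi0 hk res
    by_cases hlt : i0 < n
    · rw [PySem.List.pyRange_one_cons hlt, pvOuterA,
        pv_inner_eq n i0 ((n - 0).toNat) 0 le_rfl (by omega)]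
      norm_num
      rw [ih (i0 + 1) (by omega) (by omega)]
      have hsucc : (i0 + 1).toNat = i0.toNat + 1 := by omega
      have harg : (2 : Int) ^ (i0 + 1).toNat = 2 * 2 ^ i0.toNat := by
        rw [hsucc, pow_succ]; ring
      by_cases hp : (2 : Int) ^ i0.toNat < n
      · have h1 : (1 : Int) ≤ 2 ^ i0.toNat := pv_one_le_two_pow _
        conv_rhs => rw [pvOuterB]
        rw [dif_pos ⟨h1, hp⟩, harg, List.append_assoc]
      · have hge2 : ¬ ((2 : Int) ^ (i0 + 1).toNat < n) := by
          rw [harg]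
          have h1 : (1 : Int) ≤ 2 ^ i0.toNat := pv_one_le_two_pow _
          omega
        rw [pvPows3_nil (by tauto), pvOuterB_nil (by tauto), pvOuterB_nil (by tauto)]
        simp
    · have hni : n ≤ i0 := by omega
      rw [PySem.List.pyRange_one_eq_nil hni, pvOuterA]
      have hge : (n : Int) ≤ 2 ^ i0.toNat := by
        have h2 : (i0.toNat : Int) + 1 ≤ 2 ^ i0.toNat := pv_le_two_pow _
        nlinarith [Int.toNat_of_nonneg hi0]
      rw [pvOuterB_nil (by omega), List.append_nil]

-- ===== VERDICT (by name: the statement is the Claim_ definition above) =====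
theorem calc_sort3_spec : Claim_equal_calc_sort3 := by
  intro n _
  unfold Spec_calc_sort3 calc_sort3 calc_sort3_alt
  rw [pv_outer_eq n (n - 0).toNat 0 le_rfl (by omega)]
  simp
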